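-- pv_equiv track=rewrite | github.com/AeonNovaFutureLabs/ANFL-Diagram-Engine | utils/diagram_processor.py | parse_mermaid
-- ===== SOURCE A (Python) =====
-- from typing import List, Tuple
--
-- def parse_mermaid(content: str) -> List[str]:
--     """Parse multiple Mermaid diagrams from content."""
--     diagrams = []
--     current_diagram = []
--     in_diagram = False
--
--     for line in content.split('\n'):
--         if line.strip().startswith('graph') or line.strip().startswith('sequenceDiagram'):
--             if current_diagram:
--                 diagrams.append('\n'.join(current_diagram))
--             current_diagram = [line]
--             in_diagram = True
--         elif in_diagram:
--             current_diagram.append(line)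
--
--     if current_diagram:
--         diagrams.append('\n'.join(current_diagram))
--
--     return diagrams
-- ===== SOURCE B (Python) =====
-- def _is_marker(line):
--     s = line.strip()
--     return s.startswith('graph') or s.startswith('sequenceDiagram')
--
-- def _next_marker(lines, i):
--     """Index of the first marker line at or after i (len(lines) if none)."""
--     n = len(lines)
--     while i < n and not _is_marker(lines[i]):
--         i += 1
--     return i
--
-- def parse_mermaid(content):
--     """Parse multiple Mermaid diagrams from content.
--
--     Two-pointer index table: find each marker line, then slice up to the
--     next marker (or the end); lines before the first marker are dropped.
--     """
--     lines = content.split('\n')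
--     diagrams = []
--     i = _next_marker(lines, 0)
--     while i < len(lines):
--         j = _next_marker(lines, i + 1)
--         diagrams.append('\n'.join(lines[i:j]))
--         i = j
--     return diagrams
-- ===== Notes on version B (the rewrite author's own statement) =====
-- stated objective: alternative
-- what changed: Replaces the flag-driven accumulator loop (diagrams/current_diagram/in_diagram) with a two-pointer index scan: find each marker line's index, then slice lines[i:j] up to the next marker and join each slice.
import Mathlib
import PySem

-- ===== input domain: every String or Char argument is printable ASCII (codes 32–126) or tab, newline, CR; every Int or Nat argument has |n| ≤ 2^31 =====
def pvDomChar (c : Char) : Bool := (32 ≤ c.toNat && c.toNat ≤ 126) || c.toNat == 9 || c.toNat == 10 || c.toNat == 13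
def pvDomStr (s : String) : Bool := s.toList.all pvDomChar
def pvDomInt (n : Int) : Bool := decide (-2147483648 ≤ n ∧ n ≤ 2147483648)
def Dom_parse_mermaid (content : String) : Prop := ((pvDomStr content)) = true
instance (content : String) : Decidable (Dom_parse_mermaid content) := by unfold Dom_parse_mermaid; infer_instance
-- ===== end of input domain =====

-- B replaces A's flag-driven accumulation with a marker-index/two-pointer slicing scan (alternative decomposition, same cost).

-- ===== PORT A =====
-- line.strip().startswith('graph') or line.strip().startswith('sequenceDiagram')
def pvIsMarker (line : String) : Bool :=
  PySem.Str.startswith (PySem.Str.strip line) "graph" ||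
  PySem.Str.startswith (PySem.Str.strip line) "sequenceDiagram"

-- one iteration of A's for-loop over (diagrams, current_diagram, in_diagram)
-- content.split('\n'); exact: sep "\n" is nonempty, so Str.split? is always some
def pvLines (content : String) : List String := (PySem.Str.split? content "\n").getD []

def pvStepA (st : List String × List String × Bool) (line : String) :
    List String × List String × Bool :=
  let (diagrams, current, inDiagram) := st
  if pvIsMarker line then
    ((if current = [] then diagrams else diagrams ++ [PySem.Str.join "\n" current]), [line], true)
  else if inDiagram then
    (diagrams, current ++ [line], inDiagram)
  else
    (diagrams, current, inDiagram)

def parse_mermaid (content : String) : List String :=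
  match (pvLines content).foldl pvStepA ([], [], false) with
  | (diagrams, current, _) =>
    if current = [] then diagrams else diagrams ++ [PySem.Str.join "\n" current]

-- ===== PORT B =====
-- _next_marker: index of the first marker line at or after i (length if none)
def pvNextMarker (lines : List String) (i : Nat) : Nat :=
  if h : i < lines.length then
    if pvIsMarker lines[i] then i else pvNextMarker lines (i + 1)
  else i
termination_by lines.length - i

theorem pvNextMarker_ge (lines : List String) (i : Nat) : i ≤ pvNextMarker lines i := by
  fun_induction pvNextMarker lines i with
  | case1 i h hm => omega
  | case2 i h hm ih => omega
  | case3 i h => omega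

-- B's while loop: slice from each marker index to the next, joining each slice
def pvChunks (lines : List String) (i : Nat) : List String :=
  if h : i < lines.length then
    let j := pvNextMarker lines (i + 1)
    PySem.Str.join "\n" (PySem.List.slice lines (some (i : Int)) (some (j : Int))) ::
      pvChunks lines j
  else []
termination_by lines.length - i
decreasing_by
  have : i + 1 ≤ pvNextMarker lines (i + 1) := pvNextMarker_ge lines (i + 1)
  omega

def parse_mermaid_alt (content : String) : List String :=
  let lines := pvLines content
  pvChunks lines (pvNextMarker lines 0)

-- ===== PRECONDITION & SPEC =====
def Spec_parse_mermaid (content : String) (out : List String) : Prop := out = parse_mermaid_alt content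
instance (content : String) (out : List String) : Decidable (Spec_parse_mermaid content out) := by unfold Spec_parse_mermaid; infer_instance

-- ===== CLAIM (what is proved, stated in full; the proofs are below) =====
def Claim_equal_parse_mermaid : Prop := ∀ (content : String), Dom_parse_mermaid content → Spec_parse_mermaid content (parse_mermaid content)

-- ===== LEMMAS AND PROOFS =====

-- the marker-negating predicate the reductions use
def pvP : String → Bool := fun x => !pvIsMarker x

-- canonical grouping both ports are reduced to
def pvSpecGo : List String → List String
  | [] => []
  | l :: ls =>
    if pvIsMarker l then
      PySem.Str.join "\n" (l :: ls.takeWhile pvP) ::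
        pvSpecGo (ls.dropWhile pvP)
    else
      pvSpecGo ls
termination_by ls => ls.length
decreasing_by
  all_goals simp
  have := List.length_dropWhile_le pvP ls
  omega

theorem pv_takeWhile_eq_take (p : String → Bool) (ls : List String) :
    ls.takeWhile p = ls.take (ls.takeWhile p).length := by
  exact (List.prefix_iff_eq_take).1 (List.takeWhile_prefix p)

theorem pv_dropWhile_eq_drop (p : String → Bool) (ls : List String) :
    ls.dropWhile p = ls.drop (ls.takeWhile p).length := by
  induction ls with
  | nil => rfl
  | cons l ls ih =>
    by_cases hp : p l
    · simp [hp, ih]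
    · simp [hp]

theorem pvSpecGo_nil : pvSpecGo [] = [] := by rw [pvSpecGo]

theorem pvSpecGo_cons (l : String) (ls : List String) :
    pvSpecGo (l :: ls) =
      if pvIsMarker l then
        PySem.Str.join "\n" (l :: ls.takeWhile pvP) :: pvSpecGo (ls.dropWhile pvP)
      else pvSpecGo ls := by
  rw [pvSpecGo]

theorem pvNextMarker_spec (lines : List String) (i : Nat) :
    pvNextMarker lines i = i + ((lines.drop i).takeWhile pvP).length := by
  fun_induction pvNextMarker lines i with
  | case1 i h hm =>
    rw [List.drop_eq_getElem_cons h, List.takeWhile_cons_of_neg (by simp [pvP, hm])]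
    simp
  | case2 i h hm ih =>
    rw [List.drop_eq_getElem_cons h, List.takeWhile_cons_of_pos (by simp [pvP, hm]),
        ih, List.length_cons]
    omega
  | case3 i h =>
    rw [List.drop_eq_nil_of_le (by omega)]
    simp

theorem pvNextMarker_marker (lines : List String) (i : Nat) :
    lines.length ≤ pvNextMarker lines i ∨
      pvIsMarker ((lines.drop (pvNextMarker lines i)).headI) := by
  fun_induction pvNextMarker lines i with
  | case1 i h' hm =>
    right
    rw [List.drop_eq_getElem_cons h', List.headI_cons]
    exact hm
  | case2 i h' hm ih => exact ih
  | case3 i h' => left; omega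

theorem pvChunks_spec (lines : List String) (i : Nat)
    (hcond : lines.length ≤ i ∨ pvIsMarker ((lines.drop i).headI)) :
    pvChunks lines i = pvSpecGo (lines.drop i) := by
  fun_induction pvChunks lines i with
  | case1 i h j ih =>
    have hjdef : j = pvNextMarker lines (i + 1) := rfl
    clear_value j
    have hm : pvIsMarker (lines[i]) := by
      rcases hcond with hc | hc
      · omega
      · rwa [List.drop_eq_getElem_cons h] at hc
    have hj : j = i + 1 + ((lines.drop (i + 1)).takeWhile pvP).length := by
      rw [hjdef]; exact pvNextMarker_spec lines (i + 1)
    rw [List.drop_eq_getElem_cons h, pvSpecGo_cons, if_pos hm]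
    have hslice : PySem.List.slice lines (some (i : Int)) (some (j : Int)) =
        lines[i] :: (lines.drop (i + 1)).takeWhile pvP := by
      rw [PySem.List.slice_natCast, List.drop_eq_getElem_cons h]
      have : j - i = ((lines.drop (i + 1)).takeWhile pvP).length + 1 := by omega
      rw [this, List.take_succ_cons]
      rw [← pv_takeWhile_eq_take]
    have hdropj : lines.drop j = (lines.drop (i + 1)).dropWhile pvP := by
      rw [pv_dropWhile_eq_drop, List.drop_drop]
      congr 1
    have hrec : pvChunks lines j = pvSpecGo (lines.drop j) := by
      apply ih
      rw [hjdef]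
      exact pvNextMarker_marker lines (i + 1)
    rw [hslice, hrec, hdropj]
  | case2 i h =>
    rw [List.drop_eq_nil_of_le (by omega), pvSpecGo_nil]

theorem pvSpecGo_dropWhile (ls : List String) :
    pvSpecGo (ls.dropWhile pvP) = pvSpecGo ls := by
  induction ls with
  | nil => rfl
  | cons l ls ih =>
    by_cases hm : pvIsMarker l
    · rw [List.dropWhile_cons_of_neg (by simp [pvP, hm])]
    · rw [List.dropWhile_cons_of_pos (by simp [pvP, hm]), ih, pvSpecGo]
      simp [hm]

-- A's trailing flush
def pvFinA (st : List String × List String × Bool) : List String :=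
  if st.2.1 = [] then st.1 else st.1 ++ [PySem.Str.join "\n" st.2.1]

theorem pvFoldA_in (ls : List String) : ∀ (d c : List String), c ≠ [] →
    pvFinA (ls.foldl pvStepA (d, c, true)) =
      d ++ PySem.Str.join "\n" (c ++ ls.takeWhile pvP) :: pvSpecGo (ls.dropWhile pvP) := by
  induction ls with
  | nil => intro d c hc; simp [pvFinA, pvSpecGo_nil, hc]
  | cons l ls ih =>
    intro d c hc
    by_cases hm : pvIsMarker l
    · have hstep : pvStepA (d, c, true) l = (d ++ [PySem.Str.join "\n" c], [l], true) := by
        simp [pvStepA, hm, hc]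
      rw [List.foldl_cons, hstep, ih _ [l] (by simp)]
      rw [List.takeWhile_cons_of_neg (by simp [pvP, hm]),
          List.dropWhile_cons_of_neg (by simp [pvP, hm]), pvSpecGo_cons]
      simp [hm]
    · have hstep : pvStepA (d, c, true) l = (d, c ++ [l], true) := by
        simp [pvStepA, hm]
      rw [List.foldl_cons, hstep, ih _ (c ++ [l]) (by simp)]
      rw [List.takeWhile_cons_of_pos (by simp [pvP, hm]),
          List.dropWhile_cons_of_pos (by simp [pvP, hm])]
      simp

theorem pvFoldA_out (ls : List String) : ∀ (d : List String),
    pvFinA (ls.foldl pvStepA (d, [], false)) = d ++ pvSpecGo ls := by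
  induction ls with
  | nil => intro d; simp [pvFinA, pvSpecGo_nil]
  | cons l ls ih =>
    intro d
    by_cases hm : pvIsMarker l
    · have hstep : pvStepA (d, [], false) l = (d, [l], true) := by
        simp [pvStepA, hm]
      rw [List.foldl_cons, hstep, pvFoldA_in ls d [l] (by simp), pvSpecGo_cons]
      simp [hm]
    · have hstep : pvStepA (d, [], false) l = (d, [], false) := by
        simp [pvStepA, hm]
      rw [List.foldl_cons, hstep, ih d, pvSpecGo_cons]
      simp [hm]

theorem parse_mermaid_eq_spec (content : String) :
    parse_mermaid content = pvSpecGo (pvLines content) := by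
  have h := pvFoldA_out (pvLines content) []
  unfold parse_mermaid
  rcases hst : (pvLines content).foldl pvStepA ([], [], false) with ⟨d, c, b⟩
  rw [hst] at h
  simpa [pvFinA] using h

theorem pvAlt_eq (lines : List String) :
    pvChunks lines (pvNextMarker lines 0) = pvSpecGo lines := by
  rw [pvChunks_spec lines (pvNextMarker lines 0) (pvNextMarker_marker lines 0)]
  rw [pvNextMarker_spec lines 0]
  simp only [Nat.zero_add, List.drop_zero]
  rw [← pv_dropWhile_eq_drop]
  exact pvSpecGo_dropWhile lines

theorem parse_mermaid_alt_eq_spec (content : String) :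
    parse_mermaid_alt content = pvSpecGo (pvLines content) := by
  unfold parse_mermaid_alt
  exact pvAlt_eq (pvLines content)

-- ===== VERDICT (by name: the statement is the Claim_ definition above) =====
theorem parse_mermaid_spec : Claim_equal_parse_mermaid := by
  intro content _
  unfold Spec_parse_mermaid
  rw [parse_mermaid_eq_spec, parse_mermaid_alt_eq_spec]
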